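-- pv_equiv track=rewrite | github.com/weiss666/recommend-restaurant | app/services/filter_options_service.py | _split_and_collect
-- ===== SOURCE A (Python) =====
-- def _split_and_collect(values: list[str | None]) -> list[str]:
--     items: set[str] = set()
--     for value in values:
--         if not value:
--             continue
--         parts = [x.strip() for x in value.split(",")]
--         for p in parts:
--             if p:
--                 items.add(p)
--     return sorted(items)
-- ===== SOURCE B (Python) =====
-- def _split_and_collect(values):
--     # Different strategy: no hash set. Collect all stripped parts into a flat
--     # list (duplicates kept), sort the non-empty ones, then remove duplicates
--     # in one adjacent-dedup pass over the sorted list.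
--     raw = [p.strip() for v in values if v for p in v.split(",")]
--     parts = sorted(p for p in raw if p)
--     out = []
--     for p in parts:
--         if not out or out[-1] != p:
--             out.append(p)
--     return out
-- ===== Notes on version B (the rewrite author's own statement) =====
-- stated objective: alternative
-- what changed: B drops the hash set entirely: it collects all stripped parts into a flat list with duplicates, sorts the non-empty ones, and deduplicates in one adjacent-compare pass over the sorted list (sort-unique instead of set-then-sort).
import Mathlib
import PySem

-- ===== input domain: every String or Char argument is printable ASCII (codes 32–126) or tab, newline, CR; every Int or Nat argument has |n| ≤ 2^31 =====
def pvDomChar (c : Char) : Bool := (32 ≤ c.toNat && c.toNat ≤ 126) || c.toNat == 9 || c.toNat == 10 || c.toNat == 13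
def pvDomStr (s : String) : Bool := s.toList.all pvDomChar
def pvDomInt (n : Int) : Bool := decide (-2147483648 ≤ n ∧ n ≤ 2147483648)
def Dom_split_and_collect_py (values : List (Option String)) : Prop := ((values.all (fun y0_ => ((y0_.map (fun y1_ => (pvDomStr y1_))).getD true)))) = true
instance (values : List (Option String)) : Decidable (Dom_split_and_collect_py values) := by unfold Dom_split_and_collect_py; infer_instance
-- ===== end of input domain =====

-- B replaces A's hash set by sort-then-adjacent-dedup: flat list of stripped parts,
-- sort the non-empty ones, one adjacent-compare pass removes duplicates (objective: alternative).

-- ===== PORT A =====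
def split_and_collect_py (values : List (Option String)) : List String :=
  let items : PySem.Set String :=
    values.foldl (fun items value =>
      match value with
      | none => items                      -- 'if not value: continue' (None case)
      | some v =>
        if v = "" then items               -- 'if not value: continue' (empty-string case)
        else
          let parts := ((PySem.Str.split? v ",").getD []).map PySem.Str.strip
          parts.foldl (fun it p => if p ≠ "" then it.add p else it) items)
      PySem.Set.empty
  PySem.List.sorted items (fun x => x) false

-- ===== PORT B =====
def split_and_collect_py_alt (values : List (Option String)) : List String :=
  -- raw = [p.strip() for v in values if v for p in v.split(",")]
  let raw : List String :=
    (values.filterMap (fun v => v.bind (fun s => if s = "" then none else some s))).flatMap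
      (fun v => ((PySem.Str.split? v ",").getD []).map PySem.Str.strip)
  -- parts = sorted(p for p in raw if p)
  let parts := PySem.List.sorted (raw.filter (fun p => decide (p ≠ ""))) (fun x => x) false
  -- adjacent dedup: 'if not out or out[-1] != p: out.append(p)'
  parts.foldl (fun out p => if out.getLast? ≠ some p then out ++ [p] else out) []

-- ===== PRECONDITION & SPEC =====
def Spec_split_and_collect_py (values : List (Option String)) (out : List String) : Prop := out = split_and_collect_py_alt values
instance (values : List (Option String)) (out : List String) : Decidable (Spec_split_and_collect_py values out) := by unfold Spec_split_and_collect_py; infer_instance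

-- ===== CLAIM (what is proved, stated in full; the proofs are below) =====
def Claim_equal_split_and_collect_py : Prop := ∀ (values : List (Option String)), Dom_split_and_collect_py values → Spec_split_and_collect_py values (split_and_collect_py values)

-- ===== LEMMAS AND PROOFS =====

-- the truthy values, in order
def pvTruthy (values : List (Option String)) : List String :=
  values.filterMap (fun v => v.bind (fun s => if s = "" then none else some s))

-- parts for one string value, as both programs compute them
def pvParts (v : String) : List String :=
  ((PySem.Str.split? v ",").getD []).map PySem.Str.strip

-- inner fold of A: membership
theorem pv_inner_mem (parts : List String) (s : PySem.Set String) (x : String) :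
    x ∈ parts.foldl (fun it p => if p ≠ "" then it.add p else it) s ↔
      x ∈ s ∨ (x ∈ parts ∧ x ≠ "") := by
  induction parts generalizing s with
  | nil => simp
  | cons p rest ih =>
    simp only [List.foldl_cons]
    by_cases hp : p = ""
    · subst hp
      rw [if_neg (by simp : ¬(("" : String) ≠ "")), ih]
      simp only [List.mem_cons]
      tauto
    · rw [if_pos (by simpa using hp), ih]
      simp [PySem.Set.mem_add]
      constructor
      · rintro (⟨h | h⟩ | h)
        · exact Or.inl h
        · subst h; exact Or.inr ⟨Or.inl rfl, hp⟩
        · exact Or.inr ⟨Or.inr h.1, h.2⟩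
      · rintro (h | ⟨h | h, hx⟩)
        · exact Or.inl (Or.inl h)
        · subst h; exact Or.inl (Or.inr rfl)
        · exact Or.inr ⟨h, hx⟩

-- inner fold of A: nodup
theorem pv_inner_nodup (parts : List String) (s : PySem.Set String) (hs : s.Nodup) :
    (parts.foldl (fun it p => if p ≠ "" then it.add p else it) s).Nodup := by
  induction parts generalizing s with
  | nil => simpa
  | cons p rest ih =>
    simp only [List.foldl_cons]
    split
    · exact ih _ (PySem.Set.nodup_add s p hs)
    · exact ih _ hs

-- outer fold of A: membership
theorem pv_outer_mem (values : List (Option String)) (s : PySem.Set String) (x : String) :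
    x ∈ values.foldl (fun items value =>
        match value with
        | none => items
        | some v => if v = "" then items else
            (pvParts v).foldl (fun it p => if p ≠ "" then it.add p else it) items) s ↔
      x ∈ s ∨ ((∃ v ∈ pvTruthy values, x ∈ pvParts v) ∧ x ≠ "") := by
  induction values generalizing s with
  | nil => simp [pvTruthy]
  | cons ov rest ih =>
    cases ov with
    | none => simp only [List.foldl_cons]; rw [ih]; simp [pvTruthy]
    | some v =>
      by_cases hv : v = ""
      · subst hv
        simp only [List.foldl_cons]
        rw [ih]
        simp [pvTruthy]
      · simp only [List.foldl_cons, if_neg hv]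
        rw [ih]
        have hT : pvTruthy (some v :: rest) = v :: pvTruthy rest := by
          simp [pvTruthy, hv]
        rw [hT, pv_inner_mem]
        constructor
        · rintro ((h | ⟨h, hx⟩) | ⟨⟨w, hw, hxw⟩, hx⟩)
          · exact Or.inl h
          · exact Or.inr ⟨⟨v, by simp, h⟩, hx⟩
          · exact Or.inr ⟨⟨w, by simp [hw], hxw⟩, hx⟩
        · rintro (h | ⟨⟨w, hw, hxw⟩, hx⟩)
          · exact Or.inl (Or.inl h)
          · rcases List.mem_cons.mp hw with h1 | h1
            · subst h1; exact Or.inl (Or.inr ⟨hxw, hx⟩)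
            · exact Or.inr ⟨⟨w, h1, hxw⟩, hx⟩

-- outer fold of A: nodup
theorem pv_outer_nodup (values : List (Option String)) (s : PySem.Set String) (hs : s.Nodup) :
    (values.foldl (fun items value =>
        match value with
        | none => items
        | some v => if v = "" then items else
            (pvParts v).foldl (fun it p => if p ≠ "" then it.add p else it) items) s).Nodup := by
  induction values generalizing s with
  | nil => simpa
  | cons ov rest ih =>
    cases ov with
    | none => exact ih _ hs
    | some v =>
      by_cases hv : v = ""
      · subst hv; simp only [List.foldl_cons]; exact ih _ hs
      · simp only [List.foldl_cons, if_neg hv]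
        exact ih _ (pv_inner_nodup _ _ hs)

-- adjacent dedup of B, in recursive form (prev = last emitted element)
def pvDedup : Option String → List String → List String
  | _, [] => []
  | prev, p :: rest => if prev ≠ some p then p :: pvDedup (some p) rest else pvDedup prev rest

-- B's fold IS pvDedup
theorem pv_fold_eq_dedup (l : List String) (out : List String) :
    l.foldl (fun out p => if out.getLast? ≠ some p then out ++ [p] else out) out
      = out ++ pvDedup out.getLast? l := by
  induction l generalizing out with
  | nil => simp [pvDedup]
  | cons p rest ih =>
    simp only [List.foldl_cons, pvDedup]
    by_cases h : out.getLast? = some p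
    · rw [if_neg (by simp [h]), if_neg (by simp [h]), ih]
    · rw [if_pos (by simpa using h), if_pos (by simpa using h), ih]
      simp

-- pvDedup on a ≤-sorted list: strictly increasing, members are those ≠ prev, all above prev
theorem pv_dedup_spec : ∀ (l : List String) (prev : Option String),
    l.Pairwise (· ≤ ·) → (∀ a, prev = some a → ∀ x ∈ l, a ≤ x) →
    (pvDedup prev l).Pairwise (· < ·) ∧
      (∀ x, x ∈ pvDedup prev l ↔ x ∈ l ∧ prev ≠ some x) ∧
      (∀ a, prev = some a → ∀ x ∈ pvDedup prev l, a < x) := by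
  intro l
  induction l with
  | nil => intro prev _ _; simp [pvDedup]
  | cons p rest ih =>
    intro prev hpw hlo
    have hhead : ∀ x ∈ rest, p ≤ x := (List.pairwise_cons.mp hpw).1
    have htail : rest.Pairwise (· ≤ ·) := (List.pairwise_cons.mp hpw).2
    by_cases hc : prev = some p
    · -- duplicate of prev: dropped
      subst hc
      have ih' := ih (some p) htail (by rintro a rfl1; cases rfl1; exact hhead)
      rw [pvDedup, if_neg (by simp)]
      refine ⟨ih'.1, ?_, ih'.2.2⟩
      intro x
      rw [ih'.2.1 x]
      constructor
      · rintro ⟨hx, hne⟩; exact ⟨List.mem_cons_of_mem _ hx, hne⟩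
      · rintro ⟨hx, hne⟩
        rcases List.mem_cons.mp hx with rfl | hx
        · exact absurd rfl hne
        · exact ⟨hx, hne⟩
    · -- new element: emitted
      have ih' := ih (some p) htail (by rintro a rfl1; cases rfl1; exact hhead)
      rw [pvDedup, if_pos (by simpa using hc)]
      refine ⟨?_, ?_, ?_⟩
      · exact List.pairwise_cons.mpr ⟨ih'.2.2 p rfl, ih'.1⟩
      · intro x
        simp only [List.mem_cons]
        constructor
        · rintro (rfl | hx)
          · exact ⟨Or.inl rfl, hc⟩
          · rcases (ih'.2.1 x).mp hx with ⟨hxr, hnep⟩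
            refine ⟨Or.inr hxr, ?_⟩
            rintro rfl
            exact hnep (congrArg some (le_antisymm (hhead x hxr) (hlo x rfl p (List.mem_cons_self))))
        · rintro ⟨rfl | hx, hnx⟩
          · exact Or.inl rfl
          · by_cases hxp : x = p
            · exact Or.inl hxp
            · exact Or.inr ((ih'.2.1 x).mpr ⟨hx, by simpa using fun h => hxp h.symm⟩)
      · rintro a rfl1 x hx
        cases rfl1
        have hap : a ≤ p := hlo a rfl p (List.mem_cons_self)
        have hanep : a ≠ p := fun h => hc (congrArg some h)
        rcases List.mem_cons.mp hx with rfl | hx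
        · exact lt_of_le_of_ne hap hanep
        · exact lt_trans (lt_of_le_of_ne hap hanep) (ih'.2.2 p rfl x hx)


-- ===== VERDICT (by name: the statement is the Claim_ definition above) =====
theorem split_and_collect_py_spec : Claim_equal_split_and_collect_py := by
  intro values _
  unfold Spec_split_and_collect_py split_and_collect_py split_and_collect_py_alt
  simp only []
  set raw := ((values.filterMap (fun v => v.bind (fun s => if s = "" then none else some s))).flatMap
      (fun v => ((PySem.Str.split? v ",").getD []).map PySem.Str.strip)) with hraw
  set parts := PySem.List.sorted (raw.filter (fun p => decide (p ≠ ""))) (fun x => x) false with hparts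
  rw [pv_fold_eq_dedup parts []]
  have hnil : ([] : List String) ++ pvDedup ([] : List String).getLast? parts
      = pvDedup none parts := by simp
  rw [hnil]
  have hsorted : parts.Pairwise (· ≤ ·) := PySem.List.sorted_pairwise _ _
  have hspec := pv_dedup_spec parts none hsorted (by rintro a h; cases h)
  have hmem_parts : ∀ x, x ∈ parts ↔ ((∃ v ∈ pvTruthy values, x ∈ pvParts v) ∧ x ≠ "") := by
    intro x
    rw [hparts, PySem.List.mem_sorted, List.mem_filter]
    simp [hraw, pvTruthy, pvParts, List.mem_flatMap]
  have hBmem : ∀ x, x ∈ pvDedup none parts ↔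
      ((∃ v ∈ pvTruthy values, x ∈ pvParts v) ∧ x ≠ "") := by
    intro x
    rw [hspec.2.1 x, hmem_parts x]
    simp
  have hBnd : (pvDedup none parts).Nodup := hspec.1.imp (fun h => ne_of_lt h)
  have hAnd := pv_outer_nodup values PySem.Set.empty (by simp [PySem.Set.empty])
  have hperm : (pvDedup none parts).Perm
      (values.foldl (fun items value =>
        match value with
        | none => items
        | some v => if v = "" then items else
            (pvParts v).foldl (fun (it : PySem.Set String) p => if p ≠ "" then it.add p else it) items)
        PySem.Set.empty) := by
    apply (List.perm_ext_iff_of_nodup hBnd hAnd).mpr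
    intro x
    rw [hBmem x, pv_outer_mem values PySem.Set.empty x]
    simp [PySem.Set.empty]
  exact (PySem.List.sorted_eq_of_perm_of_pairwise_lt _ _ _ hperm hspec.1)
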